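/- GENERATED by farm/mkstatement.py from design/units.tsv (unit `GifAddExtensionBlock.E`) and the assertions of Gif/Spec/Seg_GifAddExtensionBlock.lean — do not edit.
   THE STATEMENT of the proof unit `GifAddExtensionBlock.E`: segment E of `GifAddExtensionBlock` (8 instructions; entries 0x107c4d;
   exits ret; ranges 0x107c4d-0x107c5c)
   takes each of its entry assertions to one of its exit assertions (`Gif.Spec.GifAddExtensionBlock.SegE`), given the contracts of its callees.
   What the names mean: ProgX/Base/Spec/Basic.lean (the shared hypotheses), Gif/Spec/Seg_GifAddExtensionBlock.lean (the assertions). The theorem to prove: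
   `theorem GifAddExtensionBlock_E_ok : Gif.Spec.GifAddExtensionBlock_E.Statement`. -/
import Gif.Code
import Gif.Dec.All
import Gif.Labels
import Gif.Spec.Seg_GifAddExtensionBlock
namespace Gif.Spec.GifAddExtensionBlock_E
open X86 X86.User Asan

/-- The statement of unit `GifAddExtensionBlock.E`. -/
def Statement : Prop :=
  ∀ (Lay : Layout) (_hLay : Lay.hi = 0x1000000) (μ : Microarch) (_hμ : UserX.MicroOK μ) (u₀ : State)
    (_hcode : HasCodeNat Lay u₀ Gif.L.GifAddExtensionBlock.entry Gif.Code.code_GifAddExtensionBlock.nat Gif.L.GifAddExtensionBlock.size),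
    Gif.Spec.GifAddExtensionBlock.SegE Lay μ u₀

end Gif.Spec.GifAddExtensionBlock_E
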